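-- pv_equiv track=rewrite | github.com/ncats/IFX_ODIN | src/qa_browser/app.py | _discover_columns
-- ===== SOURCE A (Python) =====
-- def _discover_columns(docs: list, is_edge: bool) -> list:
--     """Pick the most useful columns from a set of documents."""
--     if not docs:
--         return []
--     col_set = set()
--     for doc in docs:
--         col_set.update(doc.keys())
--
--     # Remove internal arango keys except _key
--     internal = {"_id", "_rev"}
--     if not is_edge:
--         internal.update({"_from", "_to"})
--     col_set -= internal
--
--     # Order: _key first, then _from/_to for edges, then id, then alpha
--     priority = ["_key", "_from", "_to", "id", "name", "symbol", "type", "description"]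
--     ordered = [c for c in priority if c in col_set]
--     remaining = sorted(col_set - set(ordered))
--     return ordered + remaining
-- ===== SOURCE B (Python) =====
-- def _discover_columns(docs: list, is_edge: bool) -> list:
--     """Pick the most useful columns from a set of documents."""
--     if not docs:
--         return []
--     cols = set()
--     for doc in docs:
--         cols.update(doc.keys())
--     internal = {"_id", "_rev"}
--     if not is_edge:
--         internal.update({"_from", "_to"})
--     priority = ["_key", "_from", "_to", "id", "name", "symbol", "type", "description"]
--     # One ranked sort: priority columns by their priority index, everything else
--     # after them in alphabetical order (name is the tie-break).
--     return sorted((c for c in cols if c not in internal),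
--                   key=lambda c: (priority.index(c) if c in priority else len(priority), c))
-- ===== Notes on version B (the rewrite author's own statement) =====
-- stated objective: simpler
-- what changed: The two-part ordering (priority-filter comprehension followed by sorted() of the set complement) is replaced by one keyed sort over the collected columns, ranking each column by its priority index (or len(priority) if non-priority) with the name as tie-break.
import Mathlib
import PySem

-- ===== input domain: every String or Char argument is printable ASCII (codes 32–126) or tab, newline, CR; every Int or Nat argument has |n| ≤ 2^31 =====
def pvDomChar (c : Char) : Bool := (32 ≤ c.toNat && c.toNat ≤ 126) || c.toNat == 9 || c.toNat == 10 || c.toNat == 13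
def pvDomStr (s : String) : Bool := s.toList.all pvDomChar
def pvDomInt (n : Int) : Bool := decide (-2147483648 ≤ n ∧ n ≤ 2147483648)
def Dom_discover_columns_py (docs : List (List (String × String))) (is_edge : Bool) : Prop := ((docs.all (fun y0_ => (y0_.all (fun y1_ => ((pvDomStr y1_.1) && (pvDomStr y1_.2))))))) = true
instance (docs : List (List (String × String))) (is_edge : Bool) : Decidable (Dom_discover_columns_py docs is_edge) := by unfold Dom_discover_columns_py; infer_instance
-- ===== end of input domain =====

-- B replaces A's two-part ordering (priority filter + sorted complement) by a single
-- sort under a composite (priority-rank, name) key; same result, simpler decomposition.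

-- the shared module constant: priority = ["_key", "_from", "_to", "id", "name", "symbol", "type", "description"]
def pvPriority : List String := ["_key", "_from", "_to", "id", "name", "symbol", "type", "description"]

-- internal = {"_id", "_rev"}; if not is_edge: internal.update({"_from", "_to"})
def pvInternal (is_edge : Bool) : PySem.Set String :=
  if is_edge then PySem.Set.ofList ["_id", "_rev"]
  else PySem.Set.update (PySem.Set.ofList ["_id", "_rev"]) ["_from", "_to"]

-- col_set = set(); for doc in docs: col_set.update(doc.keys())
def pvCollect (docs : List (List (String × String))) : PySem.Set String :=
  docs.foldl (fun s doc => PySem.Set.update s (doc.map Prod.fst)) PySem.Set.empty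

-- ===== PORT A =====
def discover_columns_py (docs : List (List (String × String))) (is_edge : Bool) : List String :=
  if docs = [] then []
  else
    let col_set := PySem.Set.diff (pvCollect docs) (pvInternal is_edge)
    let ordered := pvPriority.filter (fun c => PySem.Set.contains col_set c)
    let remaining := PySem.List.sorted (PySem.Set.diff col_set (PySem.Set.ofList ordered)) (fun x => x)
    ordered ++ remaining

-- ===== PORT B =====
-- priority.index(c) if c in priority else len(priority)
def pvRank (c : String) : Int :=
  match PySem.List.index? pvPriority c with
  | some i => (i : Int)
  | none => (pvPriority.length : Int)

def discover_columns_py_alt (docs : List (List (String × String))) (is_edge : Bool) : List String :=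
  if docs = [] then []
  else
    PySem.List.sorted
      ((pvCollect docs).filter (fun c => !(PySem.Set.contains (pvInternal is_edge) c)))
      (fun c => toLex (pvRank c, c))

-- ===== PRECONDITION & SPEC =====
def Spec_discover_columns_py (docs : List (List (String × String))) (is_edge : Bool) (out : List String) : Prop := out = discover_columns_py_alt docs is_edge
instance (docs : List (List (String × String))) (is_edge : Bool) (out : List String) : Decidable (Spec_discover_columns_py docs is_edge out) := by unfold Spec_discover_columns_py; infer_instance

-- ===== CLAIM (what is proved, stated in full; the proofs are below) =====
def Claim_equal_discover_columns_py : Prop := ∀ (docs : List (List (String × String))) (is_edge : Bool), Dom_discover_columns_py docs is_edge → Spec_discover_columns_py docs is_edge (discover_columns_py docs is_edge)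

-- ===== LEMMAS AND PROOFS =====

theorem pvPriority_nodup : pvPriority.Nodup := by decide

theorem pvRank_lt_of_mem {a : String} (h : a ∈ pvPriority) : pvRank a < 8 := by
  fin_cases h <;> decide

theorem pvRank_eq_of_not_mem {a : String} (h : a ∉ pvPriority) : pvRank a = 8 := by
  unfold pvRank
  rw [(PySem.List.index?_eq_none_iff pvPriority a).2 h]
  rfl

theorem pvPriority_rank_pairwise : pvPriority.Pairwise (fun a b => pvRank a < pvRank b) := by
  decide

theorem pvCollect_nodup (docs : List (List (String × String))) : (pvCollect docs).Nodup := by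
  unfold pvCollect
  induction docs using List.reverseRecOn with
  | nil => exact List.nodup_nil
  | append_singleton t d ih =>
    rw [List.foldl_append, List.foldl_cons, List.foldl_nil]
    exact PySem.Set.nodup_update _ _ ih

-- the heart: a single (rank, name)-keyed sort of a duplicate-free column list equals
-- "priority filter, then the alphabetically sorted rest"
theorem pv_main (L : List String) (hnd : L.Nodup) :
    PySem.List.sorted L (fun c => toLex (pvRank c, c)) =
      (pvPriority.filter (fun c => PySem.Set.contains L c)) ++
        PySem.List.sorted (PySem.Set.diff L (PySem.Set.ofList (pvPriority.filter (fun c => PySem.Set.contains L c)))) (fun x => x) := by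
  set ordered := pvPriority.filter (fun c => PySem.Set.contains L c) with hord
  set rest := PySem.Set.diff L (PySem.Set.ofList ordered) with hrest
  have hmem_ord : ∀ x, x ∈ ordered ↔ x ∈ pvPriority ∧ x ∈ L := by
    intro x
    simp [hord, List.mem_filter]
  have hmem_rest : ∀ x, x ∈ rest ↔ x ∈ L ∧ x ∉ pvPriority := by
    intro x
    rw [hrest, PySem.Set.mem_diff, PySem.Set.mem_ofList]
    constructor
    · rintro ⟨hL, hno⟩
      refine ⟨hL, fun hp => hno ((hmem_ord x).2 ⟨hp, hL⟩)⟩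
    · rintro ⟨hL, hnp⟩
      exact ⟨hL, fun ho => hnp ((hmem_ord x).1 ho).1⟩
  have hrest_nodup : rest.Nodup := by
    rw [hrest]
    exact List.Nodup.filter _ hnd
  have hord_nodup : ordered.Nodup := List.Nodup.filter _ pvPriority_nodup
  set remaining := PySem.List.sorted rest (fun x : String => x) with hrem
  have hrem_perm : remaining.Perm rest := PySem.List.sorted_perm _ _ _
  apply PySem.List.sorted_eq_of_perm_of_pairwise_lt
  · -- (ordered ++ remaining).Perm L
    have h1 : (ordered ++ remaining).Perm (ordered ++ rest) :=
      List.Perm.append_left _ hrem_perm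
    refine h1.trans ?_
    have h2 : (ordered ++ rest).Nodup := by
      refine List.Nodup.append hord_nodup hrest_nodup ?_
      intro a ha hb
      exact ((hmem_rest a).1 hb).2 ((hmem_ord a).1 ha).1
    rw [List.perm_ext_iff_of_nodup h2 hnd]
    intro a
    rw [List.mem_append, hmem_ord a, hmem_rest a]
    by_cases hp : a ∈ pvPriority <;> by_cases hL : a ∈ L <;> simp [hp, hL]
  · -- strict pairwise under the composite key
    rw [List.pairwise_append]
    refine ⟨?_, ?_, ?_⟩
    · -- within ordered: ranks strictly increase
      have := List.Pairwise.filter (R := fun a b => pvRank a < pvRank b)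
        (fun c => PySem.Set.contains L c) pvPriority_rank_pairwise
      refine this.imp ?_
      intro a b hab
      rw [Prod.Lex.lt_iff]
      exact Or.inl hab
    · -- within remaining: equal ranks, names strictly increase
      have hle : remaining.Pairwise (fun a b : String => a ≤ b) := by
        have := PySem.List.sorted_pairwise rest (fun x : String => x)
        exact this
      have hne : remaining.Pairwise (fun a b : String => a ≠ b) := hrem_perm.symm.nodup hrest_nodup
      have hlt : remaining.Pairwise (fun a b : String => a < b) :=
        (hle.and hne).imp (fun h => lt_of_le_of_ne h.1 h.2)
      refine hlt.imp_of_mem ?_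
      intro a b ha hb hab
      have hra : pvRank a = 8 := pvRank_eq_of_not_mem ((hmem_rest a).1 (hrem_perm.mem_iff.1 ha)).2
      have hrb : pvRank b = 8 := pvRank_eq_of_not_mem ((hmem_rest b).1 (hrem_perm.mem_iff.1 hb)).2
      rw [Prod.Lex.lt_iff]
      exact Or.inr ⟨by simp [hra, hrb], hab⟩
    · -- across: every ordered rank < every remaining rank
      intro a ha b hb
      have hra : pvRank a < 8 := pvRank_lt_of_mem ((hmem_ord a).1 ha).1
      have hrb : pvRank b = 8 := pvRank_eq_of_not_mem ((hmem_rest b).1 (hrem_perm.mem_iff.1 hb)).2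
      rw [Prod.Lex.lt_iff]
      exact Or.inl (by simp [hrb]; simpa using hra)

-- ===== VERDICT (by name: the statement is the Claim_ definition above) =====
theorem discover_columns_py_spec : Claim_equal_discover_columns_py := by
  intro docs is_edge _
  unfold Spec_discover_columns_py discover_columns_py discover_columns_py_alt
  by_cases hd : docs = []
  · simp [hd]
  · simp only [hd, if_false]
    have hnd : (PySem.Set.diff (pvCollect docs) (pvInternal is_edge)).Nodup :=
      List.Nodup.filter _ (pvCollect_nodup docs)
    have := pv_main (PySem.Set.diff (pvCollect docs) (pvInternal is_edge)) hnd
    rw [show ((pvCollect docs).filter (fun c => !(PySem.Set.contains (pvInternal is_edge) c)))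
        = PySem.Set.diff (pvCollect docs) (pvInternal is_edge) from rfl]
    exact this.symm
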